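-- pv_equiv track=rewrite | github.com/spinje/pflow | src/pflow/planning/utils/cache_builder.py | extract_static_from_prompt
-- ===== SOURCE A (Python) =====
-- def extract_static_from_prompt(
--     full_prompt: str,
--     dynamic_markers: list[str]
-- ) -> tuple[str, str]:
--     """Extract static and dynamic portions from a prompt.
--
--     Helper function to separate static content (cacheable) from
--     dynamic content (user-specific) in existing prompts.
--
--     Args:
--         full_prompt: The complete prompt with both static and dynamic content
--         dynamic_markers: List of markers that indicate dynamic content
--                         (e.g., ["User Request:", "Selected Components:"])
--
--     Returns:
--         Tuple of (static_content, dynamic_content)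
--     """
--     static_parts = []
--     dynamic_parts = []
--
--     lines = full_prompt.split('\n')
--     in_dynamic_section = False
--
--     for line in lines:
--         # Check if this line starts a dynamic section
--         for marker in dynamic_markers:
--             if marker in line:
--                 in_dynamic_section = True
--                 break
--
--         if in_dynamic_section:
--             dynamic_parts.append(line)
--         else:
--             static_parts.append(line)
--
--     static_content = '\n'.join(static_parts).strip()
--     dynamic_content = '\n'.join(dynamic_parts).strip()
--
--     return static_content, dynamic_content
-- ===== SOURCE B (Python) =====
-- def extract_static_from_prompt(
--     full_prompt: str,
--     dynamic_markers: list[str]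
-- ) -> tuple[str, str]:
--     """Split the prompt at the first line containing any dynamic marker."""
--     lines = full_prompt.split('\n')
--     idx = next((i for i, line in enumerate(lines)
--                 if any(marker in line for marker in dynamic_markers)),
--                len(lines))
--     return ('\n'.join(lines[:idx]).strip(), '\n'.join(lines[idx:]).strip())
-- ===== Notes on version B (the rewrite author's own statement) =====
-- stated objective: simpler
-- what changed: Replaces the stateful in_dynamic flag and two accumulator lists with a single computation of the first marker-line index followed by slicing lines[:idx]/lines[idx:].
import Mathlib
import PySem

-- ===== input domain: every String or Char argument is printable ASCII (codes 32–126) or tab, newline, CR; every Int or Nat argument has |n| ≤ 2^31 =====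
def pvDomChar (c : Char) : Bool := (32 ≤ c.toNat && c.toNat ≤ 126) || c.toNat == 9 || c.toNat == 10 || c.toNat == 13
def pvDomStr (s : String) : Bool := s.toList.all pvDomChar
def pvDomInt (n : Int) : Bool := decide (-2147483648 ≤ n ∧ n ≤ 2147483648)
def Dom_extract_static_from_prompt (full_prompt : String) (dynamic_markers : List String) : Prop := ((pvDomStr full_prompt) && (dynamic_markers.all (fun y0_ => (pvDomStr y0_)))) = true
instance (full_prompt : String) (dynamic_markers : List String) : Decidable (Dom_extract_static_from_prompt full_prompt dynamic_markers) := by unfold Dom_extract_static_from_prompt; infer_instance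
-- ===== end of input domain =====

-- B replaces A's stateful flag-and-two-accumulators loop by computing the first
-- marker-line index and slicing (objective: simpler).

-- ===== PORT A =====
-- one step of A's loop: inner marker scan (any/break), then append to one side
def pvStepA (dm : List String) (st : List String × List String × Bool) (line : String) :
    List String × List String × Bool :=
  let flag := if dm.any (fun marker => PySem.Str.isIn marker line) then true else st.2.2
  if flag then (st.1, st.2.1 ++ [line], flag) else (st.1 ++ [line], st.2.1, flag)

def extract_static_from_prompt (full_prompt : String) (dynamic_markers : List String) : String × String :=
  let lines := (PySem.Str.split? full_prompt "\n").getD []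
  let res := lines.foldl (pvStepA dynamic_markers) ([], [], false)
  (PySem.Str.strip (PySem.Str.join "\n" res.1), PySem.Str.strip (PySem.Str.join "\n" res.2.1))

-- ===== PORT B =====
def extract_static_from_prompt_alt (full_prompt : String) (dynamic_markers : List String) : String × String :=
  let lines := (PySem.Str.split? full_prompt "\n").getD []
  let idx := lines.findIdx (fun line => dynamic_markers.any (fun marker => PySem.Str.isIn marker line))
  (PySem.Str.strip (PySem.Str.join "\n" (lines.take idx)),
   PySem.Str.strip (PySem.Str.join "\n" (lines.drop idx)))

-- ===== PRECONDITION & SPEC =====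
def Spec_extract_static_from_prompt (full_prompt : String) (dynamic_markers : List String) (out : String × String) : Prop := out = extract_static_from_prompt_alt full_prompt dynamic_markers
instance (full_prompt : String) (dynamic_markers : List String) (out : String × String) : Decidable (Spec_extract_static_from_prompt full_prompt dynamic_markers out) := by unfold Spec_extract_static_from_prompt; infer_instance

-- ===== CLAIM (what is proved, stated in full; the proofs are below) =====
def Claim_equal_extract_static_from_prompt : Prop := ∀ (full_prompt : String) (dynamic_markers : List String), Dom_extract_static_from_prompt full_prompt dynamic_markers → Spec_extract_static_from_prompt full_prompt dynamic_markers (extract_static_from_prompt full_prompt dynamic_markers)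

-- ===== LEMMAS AND PROOFS =====

-- once the flag is true, every remaining line goes to the dynamic side
theorem pvFoldA_true (dm : List String) (lines : List String) (s d : List String) :
    lines.foldl (pvStepA dm) (s, d, true) = (s, d ++ lines, true) := by
  induction lines generalizing d with
  | nil => simp
  | cons l ls ih =>
      simp only [List.foldl_cons, pvStepA]
      split <;> simpa using ih (d ++ [l])

-- with the flag still false, A's loop splits at the first marker line
theorem pvFoldA_false (dm : List String) (lines : List String) (s d : List String) :
    (lines.foldl (pvStepA dm) (s, d, false)).1 =
      s ++ lines.take (lines.findIdx (fun line => dm.any (fun marker => PySem.Str.isIn marker line))) ∧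
    (lines.foldl (pvStepA dm) (s, d, false)).2.1 =
      d ++ lines.drop (lines.findIdx (fun line => dm.any (fun marker => PySem.Str.isIn marker line))) := by
  induction lines generalizing s with
  | nil => simp
  | cons l ls ih =>
      by_cases hp : (dm.any fun marker => PySem.Str.isIn marker l) = true
      · simp only [List.foldl_cons, pvStepA, hp, if_true, List.findIdx_cons, cond_true,
          List.take_zero, List.drop_zero, List.append_nil]
        rw [pvFoldA_true]
        simp
      · simp only [List.foldl_cons, pvStepA, hp, if_false, Bool.false_eq_true,
          List.findIdx_cons, cond_false, List.take_succ_cons, List.drop_succ_cons]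
        simpa using ih (s ++ [l])

-- ===== VERDICT (by name: the statement is the Claim_ definition above) =====
theorem extract_static_from_prompt_spec : Claim_equal_extract_static_from_prompt := by
  intro fp dm _
  have h := pvFoldA_false dm ((PySem.Str.split? fp "\n").getD []) [] []
  simp only [List.nil_append] at h
  simp only [Spec_extract_static_from_prompt, extract_static_from_prompt,
    extract_static_from_prompt_alt, h.1, h.2]
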